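-- pv_equiv track=rewrite | github.com/GeorgeT27/MIT-6.0002-pset-solution | 687c3ee2bee6229f46968d366a92345e_PS1/ps1b.py | dp_make_weight
-- ===== SOURCE A (Python) =====
-- def dp_make_weight(egg_weights, target_weight, memo = {}):
--     total_num=0
--     remaining_weight=target_weight
--     decending_weight=sorted(egg_weights,reverse=True)
--     if len(decending_weight)==1:
--         return remaining_weight
--     else:
--         numegg=remaining_weight//decending_weight[0]
--         memo[decending_weight[0]]=numegg
--         remaining_weight=remaining_weight%decending_weight[0]
--         total_num=total_num+memo[decending_weight[0]]+dp_make_weight(decending_weight[1:],remaining_weight,memo)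
--
--     return total_num
-- ===== SOURCE B (Python) =====
-- def dp_make_weight(egg_weights, target_weight, memo={}):
--     # Sort descending once, then one greedy pass of floor-div and remainder.
--     # (Return-value equivalence only: A also writes quotients into `memo`; B does not.)
--     weights = sorted(egg_weights, reverse=True)
--     total = 0
--     remaining = target_weight
--     for w in weights[:-1]:
--         total += remaining // w
--         remaining = remaining % w
--     return total + remaining
-- ===== Notes on version B (the rewrite author's own statement) =====
-- stated objective: faster
-- what changed: A re-sorts the remaining list at every level of its recursion (O(n^2 log n)); B sorts descending once and does a single iterative greedy pass accumulating floor-divisions and the running remainder (O(n log n)); equivalence is about the return value only (A also mutates memo).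
import Mathlib
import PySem

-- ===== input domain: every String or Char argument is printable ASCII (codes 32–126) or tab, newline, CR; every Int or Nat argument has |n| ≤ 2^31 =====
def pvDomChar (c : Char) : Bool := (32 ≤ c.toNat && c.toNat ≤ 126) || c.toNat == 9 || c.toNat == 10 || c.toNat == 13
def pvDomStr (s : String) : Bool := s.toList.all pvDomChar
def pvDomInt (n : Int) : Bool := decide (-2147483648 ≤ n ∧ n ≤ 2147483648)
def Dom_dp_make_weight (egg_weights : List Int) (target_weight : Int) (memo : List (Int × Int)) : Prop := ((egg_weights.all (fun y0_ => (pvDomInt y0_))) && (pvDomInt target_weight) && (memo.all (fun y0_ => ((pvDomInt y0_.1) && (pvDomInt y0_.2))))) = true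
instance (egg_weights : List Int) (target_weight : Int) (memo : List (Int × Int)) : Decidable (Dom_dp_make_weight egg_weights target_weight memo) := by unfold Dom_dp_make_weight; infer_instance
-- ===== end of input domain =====

-- B replaces A's re-sorting recursion by one descending sort and a single greedy fold (asymptotically
-- faster); equivalence is about the RETURN value only: A also writes quotients into memo, B does not.

-- ===== PORT A =====
-- Literal port of A: re-sorts at every recursive call, writes into memo, recurses on the tail.
def dp_make_weight (egg_weights : List Int) (target_weight : Int) (memo : List (Int × Int)) : Int :=
  let remaining_weight := target_weight
  let decending_weight := PySem.List.sorted egg_weights (fun x => x) true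
  if decending_weight.length = 1 then
    remaining_weight
  else if decending_weight = [] then 0  -- Python raises IndexError here (decending_weight[0] on []); excluded by Pre_
  else
    let d0 := PySem.List.pyGetD decending_weight 0 0    -- decending_weight[0]
    let numegg := PySem.Int.floordiv remaining_weight d0
    let memo1 := PySem.Dict.insert (PySem.Dict.ofList memo) d0 numegg
    let remaining_weight1 := PySem.Int.mod remaining_weight d0
    -- decending_weight[1:]
    0 + PySem.Dict.getD memo1 d0 0 +
      dp_make_weight (PySem.List.slice decending_weight (some 1) none) remaining_weight1 memo1.items
termination_by egg_weights.length
decreasing_by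
  rename_i hne
  rw [PySem.List.slice_from_one, List.length_tail]
  simp only [decending_weight] at hne ⊢
  have hl : (PySem.List.sorted egg_weights (fun x => x) true).length = egg_weights.length :=
    PySem.List.length_sorted egg_weights (fun x => x) true
  have hne' : egg_weights ≠ [] := by
    simpa [PySem.List.sorted_eq_nil_iff] using hne
  have h0 : egg_weights.length ≠ 0 := by
    simpa [List.length_eq_zero_iff] using hne'
  omega

-- ===== PORT B =====
-- one greedy step: accumulate the quotient, keep the remainder
def pvGreedyStep (p : Int × Int) (w : Int) : Int × Int :=
  (p.1 + PySem.Int.floordiv p.2 w, PySem.Int.mod p.2 w)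

def dp_make_weight_alt (egg_weights : List Int) (target_weight : Int) (memo : List (Int × Int)) : Int :=
  let weights := PySem.List.sorted egg_weights (fun x => x) true
  let p := (PySem.List.slice weights none (some (-1))).foldl pvGreedyStep (0, target_weight)
  p.1 + p.2

-- ===== PRECONDITION & SPEC =====
-- Pre_ excludes exactly the inputs on which Python A raises: the empty list (IndexError) and lists
-- in which 0 occurs among the divisors, i.e. anywhere but as the unique minimum (ZeroDivisionError).
def Pre_dp_make_weight (egg_weights : List Int) (target_weight : Int) (memo : List (Int × Int)) : Prop :=
  egg_weights ≠ [] ∧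
    ((0 : Int) ∈ egg_weights → egg_weights.count 0 = 1 ∧ ∀ x ∈ egg_weights, 0 ≤ x)
instance (egg_weights : List Int) (target_weight : Int) (memo : List (Int × Int)) : Decidable (Pre_dp_make_weight egg_weights target_weight memo) := by unfold Pre_dp_make_weight; infer_instance

def pvWitness_dp_make_weight : List Int × Int × (List (Int × Int)) := ([5, 1, 3], 17, [])

def Spec_dp_make_weight (egg_weights : List Int) (target_weight : Int) (memo : List (Int × Int)) (out : Int) : Prop := out = dp_make_weight_alt egg_weights target_weight memo
instance (egg_weights : List Int) (target_weight : Int) (memo : List (Int × Int)) (out : Int) : Decidable (Spec_dp_make_weight egg_weights target_weight memo out) := by unfold Spec_dp_make_weight; infer_instance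

-- ===== CLAIM (what is proved, stated in full; the proofs are below) =====
def Claim_equal_dp_make_weight : Prop := ∀ (egg_weights : List Int) (target_weight : Int) (memo : List (Int × Int)), Dom_dp_make_weight egg_weights target_weight memo → Pre_dp_make_weight egg_weights target_weight memo → Spec_dp_make_weight egg_weights target_weight memo (dp_make_weight egg_weights target_weight memo)

-- ===== LEMMAS AND PROOFS =====

-- the total accumulated in the fold's first component is an additive offset
theorem pvGreedy_fold_fst (L : List Int) (c r : Int) :
    L.foldl pvGreedyStep (c, r) =
      (c + (L.foldl pvGreedyStep (0, r)).1, (L.foldl pvGreedyStep (0, r)).2) := by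
  induction L generalizing c r with
  | nil => simp
  | cons a t ih =>
    simp only [List.foldl_cons]
    rw [ih, ih (pvGreedyStep (0, r) a).1]
    simp [pvGreedyStep]
    ring

-- A's recursion on an already descending-sorted nonempty list equals B's single fold over it
theorem pvA_on_sorted (d : List Int) (hp : d.Pairwise (fun a b => b ≤ a)) (hne : d ≠ [])
    (rem : Int) (memo : List (Int × Int)) :
    dp_make_weight d rem memo =
      (d.dropLast.foldl pvGreedyStep (0, rem)).1 + (d.dropLast.foldl pvGreedyStep (0, rem)).2 := by
  induction d generalizing rem memo with
  | nil => exact absurd rfl hne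
  | cons a t ih =>
    have hsort : PySem.List.sorted (a :: t) (fun x => x) true = a :: t :=
      PySem.List.sorted_rev_eq_self_of_pairwise (a :: t) (fun x => x) hp
    rw [dp_make_weight]
    simp only [hsort]
    cases t with
    | nil => simp
    | cons b t' =>
      have hlen : ¬ ((a :: b :: t').length = 1) := by simp
      rw [if_neg hlen, if_neg (List.cons_ne_nil a (b :: t'))]
      simp only [PySem.List.pyGetD_zero_cons, PySem.List.slice_from_one, List.tail_cons]
      rw [ih (List.Pairwise.of_cons hp) (by simp) (PySem.Int.mod rem a)
            (PySem.Dict.insert (PySem.Dict.ofList memo) a (PySem.Int.floordiv rem a)).items]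
      rw [PySem.Dict.getD_insert_self]
      have hdl : (a :: b :: t').dropLast = a :: (b :: t').dropLast := rfl
      rw [hdl, List.foldl_cons]
      have hstep : pvGreedyStep (0, rem) a = (PySem.Int.floordiv rem a, PySem.Int.mod rem a) := by
        simp [pvGreedyStep]
      rw [hstep,
        pvGreedy_fold_fst ((b :: t').dropLast) (PySem.Int.floordiv rem a) (PySem.Int.mod rem a)]
      ring

-- A's first action is sorting, and sorting is idempotent: A on xs = A on sorted(xs)
theorem pvA_eq_A_sorted (xs : List Int) (rem : Int) (memo : List (Int × Int)) :
    dp_make_weight xs rem memo =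
      dp_make_weight (PySem.List.sorted xs (fun x => x) true) rem memo := by
  rw [dp_make_weight, dp_make_weight]
  simp only [PySem.List.sorted_rev_sorted_rev]

-- ===== VERDICT (by name: the statement is the Claim_ definition above) =====
theorem dp_make_weight_spec : Claim_equal_dp_make_weight := by
  intro xs tw memo _ hpre
  unfold Spec_dp_make_weight dp_make_weight_alt
  rw [pvA_eq_A_sorted]
  simp only [PySem.List.slice_to_neg_one]
  exact pvA_on_sorted _ (PySem.List.sorted_pairwise_rev xs (fun x => x)) (by
    simp [PySem.List.sorted_eq_nil_iff, hpre.1]) tw memo
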